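-- pv_equiv track=rewrite | github.com/rola-ob/MusicNotaion-FinalProject | chapter1.py | pressed_keys
-- ===== SOURCE A (Python) =====
-- def pressed_keys(finger_1, min_distance):
--     flag = False
--     pressed = []
--     for line_d in finger_1:
--         if line_d[0] < min_distance:
--             if not flag:
--                 flag = True
--                 pressed.append([line_d[1], line_d[2], line_d[3]])
--         else:
--             flag = False
--     return pressed
-- ===== SOURCE B (Python) =====
-- def pressed_keys(finger_1, min_distance):
--     return [[c[1], c[2], c[3]]
--             for p, c in zip([[min_distance]] + finger_1, finger_1)
--             if c[0] < min_distance and p[0] >= min_distance]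
-- ===== Notes on version B (the rewrite author's own statement) =====
-- stated objective: simpler
-- what changed: Replaces the mutable flag state machine with a single list comprehension over predecessor/current pairs (a sentinel-prefixed zip), collecting a key exactly at each rising edge below the threshold.
import Mathlib
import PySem

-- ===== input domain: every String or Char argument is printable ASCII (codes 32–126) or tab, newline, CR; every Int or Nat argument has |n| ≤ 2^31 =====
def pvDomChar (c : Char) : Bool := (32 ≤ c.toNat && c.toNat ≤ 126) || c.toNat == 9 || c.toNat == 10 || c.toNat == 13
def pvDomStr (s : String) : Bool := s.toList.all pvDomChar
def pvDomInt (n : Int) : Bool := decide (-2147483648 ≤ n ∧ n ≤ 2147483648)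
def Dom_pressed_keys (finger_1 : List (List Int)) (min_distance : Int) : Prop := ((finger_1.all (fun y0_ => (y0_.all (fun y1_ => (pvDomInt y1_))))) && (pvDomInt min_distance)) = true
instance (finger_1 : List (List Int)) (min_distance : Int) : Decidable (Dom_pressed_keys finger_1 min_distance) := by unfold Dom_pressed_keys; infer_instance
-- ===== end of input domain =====

-- B replaces A's mutable-flag state machine with one list comprehension over
-- predecessor/current pairs (sentinel-prefixed zip); same values, simpler shape.

-- ===== PORT A =====
-- line_d[i] is ported with PySem.List.pyGet?; the .getD 0 default is only ever
-- reached outside Pre_pressed_keys (where the Python raises IndexError).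
def pkGet (ld : List Int) (i : Int) : Int := (PySem.List.pyGet? ld i).getD 0

def pkStepA (min_distance : Int) (s : Bool × List (List Int)) (line_d : List Int) :
    Bool × List (List Int) :=
  if pkGet line_d 0 < min_distance then
    if s.1 = false then
      (true, s.2 ++ [[pkGet line_d 1, pkGet line_d 2, pkGet line_d 3]])
    else s
  else (false, s.2)

def pressed_keys (finger_1 : List (List Int)) (min_distance : Int) : List (List Int) :=
  (finger_1.foldl (pkStepA min_distance) (false, [])).2

-- ===== PORT B =====
def pressed_keys_alt (finger_1 : List (List Int)) (min_distance : Int) : List (List Int) :=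
  ((([[min_distance]] ++ finger_1).zip finger_1).filter
      (fun pc => pkGet pc.2 0 < min_distance ∧ min_distance ≤ pkGet pc.1 0)).map
    (fun pc => [pkGet pc.2 1, pkGet pc.2 2, pkGet pc.2 3])

-- ===== PRECONDITION & SPEC =====
-- Pre_ excludes exactly the inputs where Python A raises IndexError: a row with
-- no element (line_d[0]), or a rising-edge row (appended from) shorter than 4.
def Pre_pressed_keys (finger_1 : List (List Int)) (min_distance : Int) : Prop :=
  (∀ ld ∈ finger_1, ld ≠ []) ∧
  (∀ pc ∈ ([[min_distance]] ++ finger_1).zip finger_1,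
      (pkGet pc.2 0 < min_distance ∧ min_distance ≤ pkGet pc.1 0) → 4 ≤ pc.2.length)
instance (finger_1 : List (List Int)) (min_distance : Int) : Decidable (Pre_pressed_keys finger_1 min_distance) := by unfold Pre_pressed_keys; infer_instance

def pvWitness_pressed_keys : List (List Int) × Int :=
  ([[5, 60, 1, 2], [1, 61, 2, 3], [2, 62, 3, 4], [9, 63, 4, 5], [0, 64, 5, 6]], 3)

def Spec_pressed_keys (finger_1 : List (List Int)) (min_distance : Int) (out : List (List Int)) : Prop := out = pressed_keys_alt finger_1 min_distance
instance (finger_1 : List (List Int)) (min_distance : Int) (out : List (List Int)) : Decidable (Spec_pressed_keys finger_1 min_distance out) := by unfold Spec_pressed_keys; infer_instance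

-- ===== CLAIM (what is proved, stated in full; the proofs are below) =====
def Claim_equal_pressed_keys : Prop := ∀ (finger_1 : List (List Int)) (min_distance : Int), Dom_pressed_keys finger_1 min_distance → Pre_pressed_keys finger_1 min_distance → Spec_pressed_keys finger_1 min_distance (pressed_keys finger_1 min_distance)

-- ===== LEMMAS AND PROOFS =====
-- Invariant: the flag equals "the previous row's head is below the threshold";
-- folding A's step from any such state produces acc ++ B's comprehension over
-- the pairs (p :: f).zip f.
theorem pk_fold_eq (m : Int) (f : List (List Int)) :
    ∀ (p : List Int) (acc : List (List Int)),
      (f.foldl (pkStepA m) (decide (pkGet p 0 < m), acc)).2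
        = acc ++ (((p :: f).zip f).filter
              (fun pc => pkGet pc.2 0 < m ∧ m ≤ pkGet pc.1 0)).map
            (fun pc => [pkGet pc.2 1, pkGet pc.2 2, pkGet pc.2 3]) := by
  induction f with
  | nil => simp
  | cons h t ih =>
    intro p acc
    by_cases hh : pkGet h 0 < m
    · by_cases hp : pkGet p 0 < m
      · have : pkStepA m (decide (pkGet p 0 < m), acc) h = (decide (pkGet h 0 < m), acc) := by
          simp [pkStepA, hh, hp]
        simp only [List.foldl_cons, this, ih h acc]
        simp [hh, not_le.mpr hp]
      · have : pkStepA m (decide (pkGet p 0 < m), acc) h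
            = (decide (pkGet h 0 < m), acc ++ [[pkGet h 1, pkGet h 2, pkGet h 3]]) := by
          simp [pkStepA, hh, hp]
        simp only [List.foldl_cons, this, ih h (acc ++ [[pkGet h 1, pkGet h 2, pkGet h 3]])]
        simp [hh, not_lt.mp hp]
    · have : pkStepA m (decide (pkGet p 0 < m), acc) h = (decide (pkGet h 0 < m), acc) := by
        simp [pkStepA, hh]
      simp only [List.foldl_cons, this, ih h acc]
      simp [hh]

-- ===== VERDICT (by name: the statement is the Claim_ definition above) =====
theorem pressed_keys_spec : Claim_equal_pressed_keys := by
  intro f m _ _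
  show pressed_keys f m = pressed_keys_alt f m
  have h0 : (false : Bool) = decide (pkGet [m] 0 < m) := by
    simp [pkGet, PySem.List.pyGet?, PySem.List.pyIdx?]
  unfold pressed_keys pressed_keys_alt
  rw [h0, pk_fold_eq m f [m] []]
  simp
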